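-- pv_equiv track=rewrite | github.com/ZHICHENGH/Chess-playing-robot | 2020-part-B-skeleton-1_1/your_team_name/makeaction.py | geteva
-- ===== SOURCE A (Python) =====
-- def isEmpty(cor,coor):
--     if (cor in coor):
--         return False
--     else:
--         return True
--
-- def CoorIsValid(coor):
--     if (coor[0]>=0 and coor[0]<=7):
--         if (coor[1]>=0 and coor[1]<=7):
--             return True
--     return False
--
-- def getboomArea(coor):
--     x=coor[0]
--     y=coor[1]
--     result=[]
--     ls=[(x-1,y-1),(x-1,y),(x-1,y+1),(x,y-1),(x,y+1),(x+1,y-1),(x+1,y),(x+1,y+1)]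
--     for i in ls:
--         if(CoorIsValid(i)):
--             result.append(i)
--     return result
--
-- def getBoomResult(boomArea,aimtokens):
--     boomtoken=[i for i in aimtokens if i in boomArea]
--     if(len(boomtoken)!=0):
--         tmptokens=[i for i in aimtokens if i not in boomArea]
--         for i in boomtoken:
--             boomtoken=boomtoken+getBoomResult(getboomArea(i),tmptokens)
--         return boomtoken
--     else:
--         return []
--
-- def geteva(owntokens,opponenttokens):
--     alltokens=owntokens+opponenttokens
--     initeva={}
--     tmpresult={}
--     for i in range(0,8):
--         for j in range(0,8):
--             point=(i,j)
--             boomArea=getboomArea(point)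
--             tmpresult[point]=list(set(getBoomResult(boomArea,alltokens)))
--             evavalue=0
--             for coor in tmpresult[point]:
--                 evavalue+=(opponenttokens.count(coor)-owntokens.count(coor))
--             if(isEmpty(point,alltokens) and evavalue!=0):
--                 if(evavalue<0):
--                     evavalue+=1
--                 else:
--                     evavalue-=1
--             initeva[point]=evavalue
--     return initeva
-- ===== SOURCE B (Python) =====
-- def _neigh(x, y):
--     return [(a, b) for a in (x - 1, x, x + 1) for b in (y - 1, y, y + 1)
--             if (a, b) != (x, y) and 0 <= a <= 7 and 0 <= b <= 7]
--
-- def geteva(owntokens, opponenttokens):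
--     alltokens = owntokens + opponenttokens
--     # distinct on-board token cells, with their net value, computed once
--     board = []
--     for c in alltokens:
--         if c not in board and 0 <= c[0] <= 7 and 0 <= c[1] <= 7:
--             board.append(c)
--     value = {c: opponenttokens.count(c) - owntokens.count(c) for c in board}
--     result = {}
--     for i in range(8):
--         for j in range(8):
--             seen = [c for c in _neigh(i, j) if c in value]
--             stack = list(seen)
--             while stack:
--                 c = stack.pop(0)
--                 for n in _neigh(c[0], c[1]):
--                     if n in value and n not in seen:
--                         seen.append(n)
--                         stack.append(n)
--             ev = sum(value[c] for c in seen)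
--             if (i, j) not in alltokens and ev != 0:
--                 ev += 1 if ev < 0 else -1
--             result[(i, j)] = ev
--     return result
-- ===== Notes on version B (the rewrite author's own statement) =====
-- stated objective: faster
-- what changed: A re-runs a recursive boom chain per cell that rescans the whole token list at every step and re-explodes shared branches exponentially; B builds the distinct on-board token cells and a net-value dict once, then runs a standard iterative worklist search over at most 64 board cells per starting cell.
import Mathlib
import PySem

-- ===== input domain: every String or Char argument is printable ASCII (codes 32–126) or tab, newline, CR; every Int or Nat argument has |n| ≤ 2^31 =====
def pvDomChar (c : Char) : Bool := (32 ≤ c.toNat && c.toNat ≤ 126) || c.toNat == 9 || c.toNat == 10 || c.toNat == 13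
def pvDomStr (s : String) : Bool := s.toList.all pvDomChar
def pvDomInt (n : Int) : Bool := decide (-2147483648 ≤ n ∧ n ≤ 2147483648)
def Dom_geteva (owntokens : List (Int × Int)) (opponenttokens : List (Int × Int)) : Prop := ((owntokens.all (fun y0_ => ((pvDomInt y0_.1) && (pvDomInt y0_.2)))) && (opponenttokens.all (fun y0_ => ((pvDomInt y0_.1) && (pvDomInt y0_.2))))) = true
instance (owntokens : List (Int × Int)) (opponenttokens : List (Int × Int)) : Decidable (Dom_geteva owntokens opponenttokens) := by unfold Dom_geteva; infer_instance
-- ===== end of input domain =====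

-- B replaces A's per-cell recursive boom simulation (which re-scans the token list and re-explodes
-- shared branches) by one pass building the distinct on-board token cells with their net values,
-- then a standard worklist graph search per cell; measured faster only if a timing run says so.

-- ===== PORT A =====
def isEmpty (cor : Int × Int) (coor : List (Int × Int)) : Bool :=
  if cor ∈ coor then false else true

def CoorIsValid (coor : Int × Int) : Bool :=
  if coor.1 ≥ 0 ∧ coor.1 ≤ 7 then
    (if coor.2 ≥ 0 ∧ coor.2 ≤ 7 then true else false)
  else false

def getboomArea (coor : Int × Int) : List (Int × Int) :=
  let x := coor.1
  let y := coor.2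
  let ls : List (Int × Int) := [(x-1,y-1),(x-1,y),(x-1,y+1),(x,y-1),(x,y+1),(x+1,y-1),(x+1,y),(x+1,y+1)]
  ls.foldl (fun result i => if CoorIsValid i then result ++ [i] else result) []

-- a filtered list shrinks strictly when one element fails the test (used by the ports' termination)
theorem pvFilterLenLt {α : Type} (l : List α) (p : α → Bool) (x : α) (hx : x ∈ l)
    (hpx : p x = false) : (l.filter p).length < l.length := by
  have hmem : x ∈ l.filter (fun a => !p a) := List.mem_filter.mpr ⟨hx, by simp [hpx]⟩
  have hpos : 0 < (l.filter (fun a => !p a)).length := List.length_pos_of_mem hmem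
  have h := List.length_eq_length_filter_add (l := l) p
  omega

def getBoomResult (boomArea : List (Int × Int)) (aimtokens : List (Int × Int)) : List (Int × Int) :=
  let boomtoken := aimtokens.filter (fun i => decide (i ∈ boomArea))
  if h : boomtoken.length ≠ 0 then
    let tmptokens := aimtokens.filter (fun i => decide (i ∉ boomArea))
    boomtoken ++ boomtoken.flatMap (fun i => getBoomResult (getboomArea i) tmptokens)
  else []
termination_by aimtokens.length
decreasing_by
  rcases List.length_pos_iff_exists_mem.mp (Nat.pos_of_ne_zero h) with ⟨x, hx⟩
  simp only [boomtoken, List.unattach_filter, List.unattach_attach, List.mem_filter] at hx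
  simp only [List.length_unattach]
  rw [show aimtokens.length = aimtokens.attach.length from List.length_attach.symm]
  exact pvFilterLenLt aimtokens.attach _ ⟨x, hx.1⟩ (List.mem_attach _ _) (by simp [hx.2])

-- Python's `tmpresult[point]` is `list(set(...))`; it is consumed only by an order-independent sum.
def geteva (owntokens : List (Int × Int)) (opponenttokens : List (Int × Int)) : List (Int × Int × Int) :=
  let alltokens := owntokens ++ opponenttokens
  let initeva := (PySem.List.pyRange 0 8 1).foldl (fun d i =>
      (PySem.List.pyRange 0 8 1).foldl (fun d j =>
        let point : Int × Int := (i, j)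
        let boomArea := getboomArea point
        let tmpresultPoint : PySem.Set (Int × Int) := PySem.Set.ofList (getBoomResult boomArea alltokens)
        let evavalue : Int := tmpresultPoint.foldl (fun ev coor => ev + ((PySem.List.count opponenttokens coor : Int) - (PySem.List.count owntokens coor : Int))) 0
        let evavalue := if isEmpty point alltokens && decide (evavalue ≠ 0) then
            (if evavalue < 0 then evavalue + 1 else evavalue - 1) else evavalue
        d.insert point evavalue) d)
    PySem.Dict.empty
  initeva.items.map (fun kv => (kv.1.1, kv.1.2, kv.2))

-- ===== PORT B =====
def neighB (x y : Int) : List (Int × Int) :=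
  ([x-1, x, x+1].flatMap (fun a => [y-1, y, y+1].map (fun b => ((a, b) : Int × Int)))).filter
    (fun c => decide (c ≠ (x, y)) && decide (0 ≤ c.1 ∧ c.1 ≤ 7) && decide (0 ≤ c.2 ∧ c.2 ≤ 7))

-- the inner `for n in _neigh(...)` loop of Source B's while-loop body
def addNew (value : PySem.Dict (Int × Int) Int) :
    List (Int × Int) → List (Int × Int) → List (Int × Int) → List (Int × Int) × List (Int × Int)
  | seen, stack, [] => (seen, stack)
  | seen, stack, n :: ns =>
    if (value.get? n).isSome ∧ n ∉ seen then addNew value (seen ++ [n]) (stack ++ [n]) ns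
    else addNew value seen stack ns

-- termination facts for bfs (cited by its decreasing_by)
theorem addNew_append (value : PySem.Dict (Int × Int) Int) (ns seen stack : List (Int × Int)) :
    ∃ new, addNew value seen stack ns = (seen ++ new, stack ++ new) ∧
      (∀ x ∈ new, (value.get? x).isSome ∧ x ∉ seen) := by
  induction ns generalizing seen stack with
  | nil => exact ⟨[], by simp [addNew]⟩
  | cons n ns ih =>
    by_cases h : (value.get? n).isSome ∧ n ∉ seen
    · obtain ⟨new, heq, hp⟩ := ih (seen ++ [n]) (stack ++ [n])
      refine ⟨n :: new, ?_, ?_⟩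
      · simpa [addNew, h] using heq
      · intro x hx
        rcases List.mem_cons.mp hx with rfl | hx
        · exact ⟨h.1, h.2⟩
        · have := hp x hx
          exact ⟨this.1, fun hc => this.2 (by simp [hc])⟩
    · obtain ⟨new, heq, hp⟩ := ih seen stack
      exact ⟨new, by simpa [addNew, h] using heq, hp⟩

theorem length_filter_not_mem_lt (keys seen : List (Int × Int)) (new : List (Int × Int))
    (x : Int × Int) (hx : x ∈ new) (hk : x ∈ keys) (hs : x ∉ seen) :
    ((keys.filter (fun k => decide (k ∉ seen ++ new))).length) <
      ((keys.filter (fun k => decide (k ∉ seen))).length) := by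
  have h1 : keys.filter (fun k => decide (k ∉ seen ++ new)) =
      (keys.filter (fun k => decide (k ∉ seen))).filter (fun k => decide (k ∉ seen ++ new)) := by
    rw [List.filter_filter]
    apply List.filter_congr
    intro a _
    by_cases ha : a ∈ seen ++ new
    · simp only [ha, decide_not]
      by_cases h2 : a ∈ seen <;> simp [h2]
    · have : a ∉ seen := fun hc => ha (by simp [hc])
      simp [ha, this]
  rw [h1]
  apply pvFilterLenLt _ _ x
  · exact List.mem_filter.mpr ⟨hk, by simp [hs]⟩
  · simp [hx]

def bfs (value : PySem.Dict (Int × Int) Int) (seen stack : List (Int × Int)) : List (Int × Int) :=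
  match stack with
  | [] => seen
  | c :: rest =>
    let p := addNew value seen rest (neighB c.1 c.2)
    bfs value p.1 p.2
termination_by (((value.keys).filter (fun k => decide (k ∉ seen))).length, stack.length)
decreasing_by
  obtain ⟨new, heq, hp⟩ := addNew_append value (neighB c.1 c.2) seen rest
  simp only [p, heq]
  cases new with
  | nil =>
    apply Prod.Lex.right' <;> simp
  | cons x xs =>
    apply Prod.Lex.left
    have hx := hp x (by simp)
    exact length_filter_not_mem_lt value.keys seen (x :: xs) x (by simp)
      ((PySem.Dict.contains_iff_mem_keys _ _).mp (by
        rw [PySem.Dict.contains_eq_isSome_get?]; exact hx.1)) hx.2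

def geteva_alt (owntokens : List (Int × Int)) (opponenttokens : List (Int × Int)) : List (Int × Int × Int) :=
  let alltokens := owntokens ++ opponenttokens
  let board := alltokens.foldl (fun b c =>
      if c ∉ b ∧ 0 ≤ c.1 ∧ c.1 ≤ 7 ∧ 0 ≤ c.2 ∧ c.2 ≤ 7 then b ++ [c] else b) []
  let value := board.foldl (fun d c =>
      d.insert c ((PySem.List.count opponenttokens c : Int) - (PySem.List.count owntokens c : Int))) PySem.Dict.empty
  let result := (PySem.List.pyRange 0 8 1).foldl (fun d i =>
      (PySem.List.pyRange 0 8 1).foldl (fun d j =>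
        let start := (neighB i j).filter (fun c => (value.get? c).isSome)
        let seen := bfs value start start
        let ev : Int := seen.foldl (fun acc c => acc + value.getD c 0) 0
        let ev := if decide ((i, j) ∉ alltokens) && decide (ev ≠ 0) then
            (if ev < 0 then ev + 1 else ev - 1) else ev
        d.insert (i, j) ev) d)
    PySem.Dict.empty
  result.items.map (fun kv => (kv.1.1, kv.1.2, kv.2))

-- ===== PRECONDITION & SPEC =====
def Spec_geteva (owntokens : List (Int × Int)) (opponenttokens : List (Int × Int)) (out : List (Int × Int × Int)) : Prop := out = geteva_alt owntokens opponenttokens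
instance (owntokens : List (Int × Int)) (opponenttokens : List (Int × Int)) (out : List (Int × Int × Int)) : Decidable (Spec_geteva owntokens opponenttokens out) := by unfold Spec_geteva; infer_instance

-- ===== CLAIM (what is proved, stated in full; the proofs are below) =====
def Claim_equal_geteva : Prop := ∀ (owntokens : List (Int × Int)) (opponenttokens : List (Int × Int)), Dom_geteva owntokens opponenttokens → Spec_geteva owntokens opponenttokens (geteva owntokens opponenttokens)

-- ===== LEMMAS AND PROOFS =====

-- shared vocabulary: raw 8-neighbour list and on-board validity
def pvNbrs (t : Int × Int) : List (Int × Int) :=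
  [(t.1-1,t.2-1),(t.1-1,t.2),(t.1-1,t.2+1),(t.1,t.2-1),(t.1,t.2+1),(t.1+1,t.2-1),(t.1+1,t.2),(t.1+1,t.2+1)]

def pvValid (c : Int × Int) : Prop := 0 ≤ c.1 ∧ c.1 ≤ 7 ∧ 0 ≤ c.2 ∧ c.2 ≤ 7

theorem coorIsValid_iff (c : Int × Int) : CoorIsValid c = true ↔ pvValid c := by
  simp only [CoorIsValid, pvValid]
  split_ifs with h1 h2 <;> simp <;> omega

theorem mem_getboomArea (c t : Int × Int) : c ∈ getboomArea t ↔ c ∈ pvNbrs t ∧ pvValid c := by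
  simp only [getboomArea]
  rw [PySem.List.foldl_append_if (f := fun x => x)]
  simp [List.mem_filter, pvNbrs, coorIsValid_iff]

theorem mem_neighB (c : Int × Int) (x y : Int) :
    c ∈ neighB x y ↔ c ∈ pvNbrs (x, y) ∧ pvValid c := by
  obtain ⟨a, b⟩ := c
  simp only [neighB, List.mem_filter, List.mem_flatMap, List.mem_map, pvNbrs, pvValid,
    List.mem_cons, List.not_mem_nil, Prod.mk.injEq, Prod.ext_iff]
  simp only [decide_eq_true_eq, Bool.and_eq_true]
  constructor
  · rintro ⟨⟨p, hp, q, hq, h1, h2⟩, hne, hv1, hv2⟩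
    subst h1; subst h2
    simp at hp hq hne ⊢
    omega
  · rintro ⟨hmem, hv⟩
    refine ⟨⟨a, ?_, b, ?_, rfl, rfl⟩, ?_, ?_, ?_⟩ <;> simp at hmem ⊢ <;> omega

theorem mem_neighB_area (c : Int × Int) (x y : Int) :
    c ∈ neighB x y ↔ c ∈ getboomArea (x, y) := by
  rw [mem_neighB, mem_getboomArea]

theorem nodup_neighB (x y : Int) : (neighB x y).Nodup := by
  apply List.Nodup.filter
  show ([(x-1,y-1),(x-1,y),(x-1,y+1),(x,y-1),(x,y),(x,y+1),(x+1,y-1),(x+1,y),(x+1,y+1)] :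
    List (Int × Int)).Nodup
  simp only [List.nodup_cons, List.mem_cons, List.not_mem_nil, List.nodup_nil, Prod.ext_iff,
    not_or, and_true, true_and, not_false_iff, and_self]
  norm_num [Prod.ext_iff]
  omega

theorem mem_area_valid {c t : Int × Int} (h : c ∈ getboomArea t) : pvValid c :=
  ((mem_getboomArea c t).mp h).2

-- ---- A-side: the recursive boom result is exactly chain-reachability ----
inductive pvReach (T A : List (Int × Int)) : (Int × Int) → Prop
  | base {t} : t ∈ T → t ∈ A → pvReach T A t
  | step {t u} : pvReach T A t → u ∈ T → u ∈ getboomArea t → pvReach T A u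

theorem pvReach_lift {T T' A : List (Int × Int)} {s t : Int × Int}
    (hs : pvReach T A s) (hsub : ∀ x ∈ T', x ∈ T)
    (h : pvReach T' (getboomArea s) t) : pvReach T A t := by
  induction h with
  | base h1 h2 => exact pvReach.step hs (hsub _ h1) h2
  | step _ h1 h2 ih => exact pvReach.step ih (hsub _ h1) h2

theorem pvReach_nonempty {T A : List (Int × Int)} {t : Int × Int}
    (h : pvReach T A t) : ∃ x, x ∈ T ∧ x ∈ A := by
  induction h with
  | base h1 h2 => exact ⟨_, h1, h2⟩
  | step _ _ _ ih => exact ih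

theorem pvReach_split {T A : List (Int × Int)} {t : Int × Int} (h : pvReach T A t) :
    t ∈ T.filter (fun i => decide (i ∈ A)) ∨
    ∃ s ∈ T.filter (fun i => decide (i ∈ A)),
      pvReach (T.filter (fun i => decide (i ∉ A))) (getboomArea s) t := by
  induction h with
  | base h1 h2 => exact Or.inl (List.mem_filter.mpr ⟨h1, by simp [h2]⟩)
  | @step t u hr h1 h2 ih =>
    by_cases hA : u ∈ A
    · exact Or.inl (List.mem_filter.mpr ⟨h1, by simp [hA]⟩)
    · have hu : u ∈ T.filter (fun i => decide (i ∉ A)) :=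
        List.mem_filter.mpr ⟨h1, by simp [hA]⟩
      rcases ih with hbt | ⟨s, hs, hrs⟩
      · exact Or.inr ⟨_, hbt, pvReach.base hu h2⟩
      · exact Or.inr ⟨s, hs, pvReach.step hrs hu h2⟩

theorem mem_getBoomResult_aux :
    ∀ (n : Nat) (T : List (Int × Int)), T.length ≤ n → ∀ (A : List (Int × Int)) (t : Int × Int),
      (t ∈ getBoomResult A T ↔ pvReach T A t) := by
  intro n
  induction n with
  | zero =>
    intro T hT A t
    have : T = [] := List.eq_nil_of_length_eq_zero (Nat.le_zero.mp hT)
    subst this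
    rw [getBoomResult]
    simp
    intro h
    rcases pvReach_nonempty h with ⟨x, hx, _⟩
    simp at hx
  | succ n ih =>
    intro T hT A t
    constructor
    · intro h
      rw [getBoomResult] at h
      by_cases hbt : (T.filter (fun i => decide (i ∈ A))).length ≠ 0
      · rw [dif_pos hbt] at h
        rcases List.mem_append.mp h with h1 | h1
        · have := List.mem_filter.mp h1
          exact pvReach.base this.1 (by simpa using this.2)
        · rcases List.mem_flatMap.mp h1 with ⟨s, hs, ht⟩
          have hsm := List.mem_filter.mp hs
          have hsT : s ∈ T := hsm.1
          have hsA : s ∈ A := by simpa using hsm.2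
          have hlt : (T.filter (fun i => decide (i ∉ A))).length < T.length :=
            pvFilterLenLt T _ s hsT (by simp [hsA])
          have hr := (ih _ (by omega) (getboomArea s) t).mp ht
          exact pvReach_lift (pvReach.base hsT hsA)
            (fun x hx => (List.mem_filter.mp hx).1) hr
      · rw [dif_neg hbt] at h
        simp at h
    · intro h
      rcases pvReach_nonempty h with ⟨x, hxT, hxA⟩
      have hxbt : x ∈ T.filter (fun i => decide (i ∈ A)) :=
        List.mem_filter.mpr ⟨hxT, by simp [hxA]⟩
      have hbt : (T.filter (fun i => decide (i ∈ A))).length ≠ 0 := by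
        have := List.length_pos_of_mem hxbt
        omega
      rw [getBoomResult, dif_pos hbt]
      apply List.mem_append.mpr
      rcases pvReach_split h with h1 | ⟨s, hs, hrs⟩
      · exact Or.inl h1
      · refine Or.inr (List.mem_flatMap.mpr ⟨s, hs, ?_⟩)
        have hsm := List.mem_filter.mp hs
        have hlt : (T.filter (fun i => decide (i ∉ A))).length < T.length :=
          pvFilterLenLt T _ s hsm.1 (by simpa using hsm.2)
        exact (ih _ (by omega) (getboomArea s) t).mpr hrs

theorem mem_getBoomResult (A T : List (Int × Int)) (t : Int × Int) :
    t ∈ getBoomResult A T ↔ pvReach T A t :=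
  mem_getBoomResult_aux T.length T le_rfl A t

-- ---- B-side: board and value dict ----
theorem mem_board_foldl (l : List (Int × Int)) :
    ∀ (b : List (Int × Int)) (x : Int × Int),
      x ∈ l.foldl (fun b c =>
        if c ∉ b ∧ 0 ≤ c.1 ∧ c.1 ≤ 7 ∧ 0 ≤ c.2 ∧ c.2 ≤ 7 then b ++ [c] else b) b ↔
      x ∈ b ∨ (x ∈ l ∧ pvValid x) := by
  induction l with
  | nil => simp
  | cons c l ih =>
    intro b x
    simp only [List.foldl_cons]
    rw [ih]
    by_cases hc : c ∉ b ∧ 0 ≤ c.1 ∧ c.1 ≤ 7 ∧ 0 ≤ c.2 ∧ c.2 ≤ 7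
    · rw [if_pos hc]
      constructor
      · intro h
        rcases h with h | ⟨h1, h2⟩
        · rcases List.mem_append.mp h with h | h
          · exact Or.inl h
          · have hxc : x = c := by simpa using h
            subst hxc
            exact Or.inr ⟨List.mem_cons_self, hc.2⟩
        · exact Or.inr ⟨List.mem_cons_of_mem _ h1, h2⟩
      · intro h
        rcases h with h | ⟨h1, h2⟩
        · exact Or.inl (List.mem_append.mpr (Or.inl h))
        · rcases List.mem_cons.mp h1 with rfl | h1
          · exact Or.inl (List.mem_append.mpr (Or.inr (by simp)))
          · exact Or.inr ⟨h1, h2⟩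
    · rw [if_neg hc]
      constructor
      · rintro (h | ⟨h1, h2⟩)
        · exact Or.inl h
        · exact Or.inr ⟨List.mem_cons_of_mem _ h1, h2⟩
      · rintro (h | ⟨h1, h2⟩)
        · exact Or.inl h
        · rcases List.mem_cons.mp h1 with rfl | h1
          · left
            rcases not_and_or.mp hc with h3 | h3
            · exact not_not.mp h3
            · exact absurd h2 h3
          · exact Or.inr ⟨h1, h2⟩

theorem get?_value_foldl (f : (Int × Int) → Int) (l : List (Int × Int)) :
    ∀ (d : PySem.Dict (Int × Int) Int) (k : Int × Int),
      (l.foldl (fun d c => d.insert c (f c)) d).get? k =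
        if k ∈ l then some (f k) else d.get? k := by
  induction l with
  | nil => simp
  | cons c l ih =>
    intro d k
    simp only [List.foldl_cons]
    rw [ih]
    by_cases hk : k ∈ l
    · simp [hk]
    · by_cases hkc : k = c
      · subst hkc
        simp [hk, PySem.Dict.get?_insert_self]
      · simp [hk, hkc, PySem.Dict.get?_insert_of_ne _ _ hkc]

-- ---- B-side: the worklist search is exactly chain-reachability ----
inductive pvReachB (value : PySem.Dict (Int × Int) Int) (start : List (Int × Int)) : (Int × Int) → Prop
  | base {t} : t ∈ start → pvReachB value start t
  | step {t u} : pvReachB value start t → (value.get? u).isSome → u ∈ neighB t.1 t.2 →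
      pvReachB value start u

theorem pvReachB_mono (value : PySem.Dict (Int × Int) Int) {S S' : List (Int × Int)}
    (h : ∀ s ∈ S', pvReachB value S s) :
    ∀ x, pvReachB value S' x → pvReachB value S x := by
  intro x hx
  induction hx with
  | base h1 => exact h _ h1
  | step _ h1 h2 ih => exact pvReachB.step ih h1 h2

theorem addNew_mem (value : PySem.Dict (Int × Int) Int) :
    ∀ (ns seen stack : List (Int × Int)) (x : Int × Int),
      x ∈ (addNew value seen stack ns).1 ↔
        x ∈ seen ∨ (x ∈ ns ∧ (value.get? x).isSome) := by
  intro ns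
  induction ns with
  | nil => simp [addNew]
  | cons n ns ih =>
    intro seen stack x
    by_cases h : (value.get? n).isSome ∧ n ∉ seen
    · simp only [addNew, if_pos h]
      rw [ih]
      simp only [List.mem_append, List.mem_cons, List.not_mem_nil, or_false]
      constructor
      · rintro (⟨hs | rfl⟩ | ⟨hns, hk⟩) <;> tauto
      · rintro (hs | ⟨rfl | hns, hk⟩) <;> tauto
    · simp only [addNew, if_neg h]
      rw [ih]
      simp only [List.mem_cons]
      rcases not_and_or.mp h with h1 | h1
      · constructor
        · rintro (hs | ⟨hns, hk⟩) <;> tauto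
        · rintro (hs | ⟨rfl | hns, hk⟩) <;> tauto
      · have hn : n ∈ seen := not_not.mp h1
        constructor
        · rintro (hs | ⟨hns, hk⟩) <;> tauto
        · rintro (hs | ⟨rfl | hns, hk⟩) <;> tauto

theorem addNew_nodup (value : PySem.Dict (Int × Int) Int) :
    ∀ (ns seen stack : List (Int × Int)), seen.Nodup → (addNew value seen stack ns).1.Nodup := by
  intro ns
  induction ns with
  | nil => exact fun seen stack h => h
  | cons n ns ih =>
    intro seen stack hs
    by_cases h : (value.get? n).isSome ∧ n ∉ seen
    · simp only [addNew, if_pos h]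
      refine ih _ _ ?_
      simp only [List.nodup_append, List.nodup_singleton, true_and, and_true]
      refine ⟨hs, ?_⟩
      intro a ha b' hb'
      simp only [List.mem_cons, List.not_mem_nil, or_false] at hb'
      subst hb'
      rintro rfl
      exact h.2 ha
    · simp only [addNew, if_neg h]
      exact ih _ _ hs

theorem bfs_superset (value : PySem.Dict (Int × Int) Int) (seen stack : List (Int × Int)) :
    ∀ x ∈ seen, x ∈ bfs value seen stack := by
  fun_induction bfs value seen stack with
  | case1 => simp
  | case2 seen c rest p ih =>
    intro x hx
    apply ih
    obtain ⟨new, heq, _⟩ := addNew_append value (neighB c.1 c.2) seen rest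
    simp only [p, heq]
    simp [hx]

theorem bfs_sub_reach (value : PySem.Dict (Int × Int) Int) (seen stack : List (Int × Int)) :
    ∀ x ∈ bfs value seen stack, x ∈ seen ∨ pvReachB value stack x := by
  fun_induction bfs value seen stack with
  | case1 => exact fun x hx => Or.inl hx
  | case2 seen c rest p ih =>
    intro x hx
    obtain ⟨new, heq, hp⟩ := addNew_append value (neighB c.1 c.2) seen rest
    have hnew : ∀ y ∈ new, pvReachB value (c :: rest) y := by
      intro y hy
      have hy2 : y ∈ (addNew value seen rest (neighB c.1 c.2)).1 := by
        rw [heq]; simp [hy]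
      have := (addNew_mem value (neighB c.1 c.2) seen rest y).mp hy2
      rcases this with hs | ⟨hn, hk⟩
      · exact absurd hs (hp y hy).2
      · exact pvReachB.step (pvReachB.base (by simp)) hk hn
    rcases ih x hx with hxs | hxr
    · simp only [p, heq] at hxs
      rcases List.mem_append.mp hxs with h1 | h1
      · exact Or.inl h1
      · exact Or.inr (hnew x h1)
    · simp only [p, heq] at hxr
      refine Or.inr (pvReachB_mono value ?_ x hxr)
      intro s hs
      rcases List.mem_append.mp hs with h1 | h1
      · exact pvReachB.base (by simp [h1])
      · exact hnew s h1

theorem bfs_closed (value : PySem.Dict (Int × Int) Int) (seen stack : List (Int × Int))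
    (hss : ∀ x ∈ stack, x ∈ seen)
    (hcl : ∀ v ∈ seen, v ∉ stack → ∀ u, (value.get? u).isSome → u ∈ neighB v.1 v.2 → u ∈ seen) :
    ∀ v ∈ bfs value seen stack, ∀ u, (value.get? u).isSome → u ∈ neighB v.1 v.2 →
      u ∈ bfs value seen stack := by
  fun_induction bfs value seen stack with
  | case1 =>
    intro v hv u hk hu
    exact hcl v hv (by simp) u hk hu
  | case2 seen c rest p ih =>
    obtain ⟨new, heq, hp⟩ := addNew_append value (neighB c.1 c.2) seen rest
    apply ih
    · intro x hx
      simp only [p, heq] at hx ⊢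
      rcases List.mem_append.mp hx with h1 | h1
      · exact List.mem_append.mpr (Or.inl (hss x (by simp [h1])))
      · exact List.mem_append.mpr (Or.inr h1)
    · intro v hv hvs u hk hu
      simp only [p, heq] at hv hvs ⊢
      have hvnew : v ∉ new := fun hc => hvs (List.mem_append.mpr (Or.inr hc))
      have hvseen : v ∈ seen := by
        rcases List.mem_append.mp hv with h1 | h1
        · exact h1
        · exact absurd h1 hvnew
      by_cases hvc : v = c
      · subst hvc
        have hmem : u ∈ (addNew value seen rest (neighB v.1 v.2)).1 :=
          (addNew_mem value _ seen rest u).mpr (Or.inr ⟨hu, hk⟩)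
        rw [heq] at hmem
        exact hmem
      · have hvrest : v ∉ rest := fun hc => hvs (List.mem_append.mpr (Or.inl hc))
        have hnotin : v ∉ (c :: rest) := by simp [hvc, hvrest]
        exact List.mem_append.mpr (Or.inl (hcl v hvseen hnotin u hk hu))

theorem bfs_nodup (value : PySem.Dict (Int × Int) Int) (seen stack : List (Int × Int))
    (h : seen.Nodup) : (bfs value seen stack).Nodup := by
  fun_induction bfs value seen stack with
  | case1 => exact h
  | case2 seen c rest p ih => exact ih (addNew_nodup value _ seen rest h)

theorem bfs_keys (value : PySem.Dict (Int × Int) Int) (seen stack : List (Int × Int))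
    (h : ∀ x ∈ seen, (value.get? x).isSome) :
    ∀ x ∈ bfs value seen stack, (value.get? x).isSome := by
  fun_induction bfs value seen stack with
  | case1 => exact h
  | case2 seen c rest p ih =>
    apply ih
    intro x hx
    rcases (addNew_mem value (neighB c.1 c.2) seen rest x).mp hx with h1 | ⟨_, h1⟩
    · exact h x h1
    · exact h1

theorem mem_bfs (value : PySem.Dict (Int × Int) Int) (start : List (Int × Int)) (x : Int × Int) :
    x ∈ bfs value start start ↔ pvReachB value start x := by
  constructor
  · intro h
    rcases bfs_sub_reach value start start x h with h1 | h1
    · exact pvReachB.base h1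
    · exact h1
  · intro h
    induction h with
    | base h1 => exact bfs_superset value start start _ h1
    | step _ h1 h2 ih =>
      exact bfs_closed value start start (fun x hx => hx)
        (fun v hv hvs => absurd hv hvs) _ ih _ h1 h2

-- ---- bridge between the two reachability notions ----
theorem reach_bridge (value : PySem.Dict (Int × Int) Int) (all : List (Int × Int))
    (i j : Int) (start : List (Int × Int))
    (hkey : ∀ c, (value.get? c).isSome = true ↔ (c ∈ all ∧ pvValid c))
    (hstart : ∀ c, c ∈ start ↔ (c ∈ neighB i j ∧ (value.get? c).isSome = true)) :
    ∀ x, pvReachB value start x ↔ pvReach all (getboomArea (i, j)) x := by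
  intro x
  constructor
  · intro h
    induction h with
    | base h1 =>
      have := (hstart _).mp h1
      have hk := (hkey _).mp this.2
      exact pvReach.base hk.1 ((mem_neighB_area _ i j).mp this.1)
    | @step t u _ h1 h2 ih =>
      have hk := (hkey _).mp h1
      exact pvReach.step ih hk.1 ((mem_neighB_area u t.1 t.2).mp (by simpa using h2))
  · intro h
    induction h with
    | base h1 h2 =>
      have hv := mem_area_valid h2
      exact pvReachB.base ((hstart _).mpr
        ⟨(mem_neighB_area _ i j).mpr h2, (hkey _).mpr ⟨h1, hv⟩⟩)
    | @step t u _ h1 h2 ih =>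
      have hv := mem_area_valid h2
      exact pvReachB.step ih ((hkey _).mpr ⟨h1, hv⟩)
        ((mem_neighB_area u t.1 t.2).mpr (by simpa using h2))

-- ---- sums over two nodup lists with the same members ----
theorem foldl_add_eq_of_mem (l1 l2 : List (Int × Int)) (f g : (Int × Int) → Int)
    (h1 : l1.Nodup) (h2 : l2.Nodup) (hmem : ∀ x, x ∈ l1 ↔ x ∈ l2)
    (hfg : ∀ x ∈ l2, f x = g x) :
    l1.foldl (fun a c => a + f c) 0 = l2.foldl (fun a c => a + g c) 0 := by
  rw [PySem.List.foldl_add, PySem.List.foldl_add]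
  have hp : l1.Perm l2 := (List.perm_ext_iff_of_nodup h1 h2).mpr hmem
  rw [(hp.map f).sum_eq, List.map_congr_left hfg]

theorem isEmpty_eq (p : Int × Int) (l : List (Int × Int)) :
    isEmpty p l = decide (p ∉ l) := by
  by_cases h : p ∈ l <;> simp [isEmpty, h]

-- ---- the per-cell values of the two programs agree ----
theorem cell_sum_eq (owntokens opponenttokens : List (Int × Int)) (i j : Int) :
    (PySem.Set.ofList (getBoomResult (getboomArea (i, j)) (owntokens ++ opponenttokens))).foldl
        (fun (ev : Int) coor => ev + ((PySem.List.count opponenttokens coor : Int) - (PySem.List.count owntokens coor : Int))) 0 =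
      (bfs (((owntokens ++ opponenttokens).foldl (fun b c =>
            if c ∉ b ∧ 0 ≤ c.1 ∧ c.1 ≤ 7 ∧ 0 ≤ c.2 ∧ c.2 ≤ 7 then b ++ [c] else b) []).foldl
          (fun d c => d.insert c ((PySem.List.count opponenttokens c : Int) - (PySem.List.count owntokens c : Int)))
          PySem.Dict.empty)
        ((neighB i j).filter (fun c => ((((owntokens ++ opponenttokens).foldl (fun b c =>
            if c ∉ b ∧ 0 ≤ c.1 ∧ c.1 ≤ 7 ∧ 0 ≤ c.2 ∧ c.2 ≤ 7 then b ++ [c] else b) []).foldl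
          (fun d c => d.insert c ((PySem.List.count opponenttokens c : Int) - (PySem.List.count owntokens c : Int)))
          PySem.Dict.empty).get? c).isSome))
        ((neighB i j).filter (fun c => ((((owntokens ++ opponenttokens).foldl (fun b c =>
            if c ∉ b ∧ 0 ≤ c.1 ∧ c.1 ≤ 7 ∧ 0 ≤ c.2 ∧ c.2 ≤ 7 then b ++ [c] else b) []).foldl
          (fun d c => d.insert c ((PySem.List.count opponenttokens c : Int) - (PySem.List.count owntokens c : Int)))
          PySem.Dict.empty).get? c).isSome))).foldl
        (fun acc c => acc + (((owntokens ++ opponenttokens).foldl (fun b c =>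
            if c ∉ b ∧ 0 ≤ c.1 ∧ c.1 ≤ 7 ∧ 0 ≤ c.2 ∧ c.2 ≤ 7 then b ++ [c] else b) []).foldl
          (fun d c => d.insert c ((PySem.List.count opponenttokens c : Int) - (PySem.List.count owntokens c : Int)))
          PySem.Dict.empty).getD c 0) 0 := by
  set all := owntokens ++ opponenttokens with hall
  set board := all.foldl (fun b c =>
      if c ∉ b ∧ 0 ≤ c.1 ∧ c.1 ≤ 7 ∧ 0 ≤ c.2 ∧ c.2 ≤ 7 then b ++ [c] else b) [] with hboard
  set f : (Int × Int) → Int :=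
    fun c => (PySem.List.count opponenttokens c : Int) - (PySem.List.count owntokens c : Int) with hf
  set value := board.foldl (fun d c => d.insert c (f c)) PySem.Dict.empty with hvalue
  set start := (neighB i j).filter (fun c => (value.get? c).isSome) with hstart
  have hkey : ∀ c, (value.get? c).isSome = true ↔ (c ∈ all ∧ pvValid c) := by
    intro c
    rw [hvalue, get?_value_foldl]
    by_cases hc : c ∈ board
    · simp only [if_pos hc, Option.isSome_some, true_iff]
      have := (mem_board_foldl all [] c).mp hc
      simpa using this
    · simp only [if_neg hc, PySem.Dict.get?_empty, Option.isSome_none]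
      constructor
      · intro h; cases h
      · intro h
        exact absurd ((mem_board_foldl all [] c).mpr (Or.inr h)) hc
  have hget : ∀ c, c ∈ all → pvValid c → value.getD c 0 = f c := by
    intro c h1 h2
    have hb : c ∈ board := (mem_board_foldl all [] c).mpr (Or.inr ⟨h1, h2⟩)
    rw [hvalue, PySem.Dict.getD_eq_get?_getD, get?_value_foldl, if_pos hb]
    rfl
  have hstartmem : ∀ c, c ∈ start ↔ (c ∈ neighB i j ∧ (value.get? c).isSome = true) := by
    intro c; rw [hstart]; simp [List.mem_filter]
  apply foldl_add_eq_of_mem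
  · exact PySem.Set.nodup_ofList _
  · exact bfs_nodup value start start ((nodup_neighB i j).filter _)
  · intro x
    rw [PySem.Set.mem_ofList, mem_getBoomResult, mem_bfs,
      reach_bridge value all i j start hkey hstartmem x]
  · intro x hx
    have hr := (reach_bridge value all i j start hkey hstartmem x).mp
      ((mem_bfs value start x).mp hx)
    have hxk : (value.get? x).isSome := by
      apply bfs_keys value start start _ x hx
      intro y hy
      exact ((hstartmem y).mp hy).2
    have := (hkey x).mp hxk
    exact (hget x this.1 this.2).symm

set_option maxHeartbeats 2000000 in
theorem geteva_eq (owntokens opponenttokens : List (Int × Int)) :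
    geteva owntokens opponenttokens = geteva_alt owntokens opponenttokens := by
  simp only [geteva, geteva_alt]
  refine congrArg (List.map _) (congrArg PySem.Dict.items ?_)
  refine PySem.List.foldl_congr_mem _ _ _ _ ?_
  intro d i _
  refine PySem.List.foldl_congr_mem _ _ _ _ ?_
  intro d' j _
  refine congrArg (PySem.Dict.insert d' (i, j)) ?_
  rw [isEmpty_eq, cell_sum_eq]

-- ===== VERDICT (by name: the statement is the Claim_ definition above) =====
theorem geteva_spec : Claim_equal_geteva := by
  intro owntokens opponenttokens _
  show geteva owntokens opponenttokens = geteva_alt owntokens opponenttokens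
  exact geteva_eq owntokens opponenttokens
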